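-- pv_equiv track=rewrite | github.com/omar-hossam/codeforces-solutions | 800/4A.py | can_divide_brute
-- ===== SOURCE A (Python) =====
-- def can_divide_brute(weight: int) -> str:
--     if not weight % 2: # if weight is even
--         # Loop through `range(weight)` to find 2 even numbers that sum to weight
--         for i in range(weight):
--             for j in range(weight):
--                 if not i % 2 and not j % 2 and i + j == weight:
--                     return "YES"
--         return "NO"
--     return "NO" # if weight is odd
-- ===== SOURCE B (Python) =====
-- def can_divide_brute(weight: int) -> str:
--     # weight splits into two positive even summands iff it is even and >= 4
--     return "YES" if weight % 2 == 0 and weight >= 4 else "NO"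
-- ===== Notes on version B (the rewrite author's own statement) =====
-- stated objective: simpler
-- what changed: Replaced the nested brute-force scan over range(weight) with the closed-form one-line test 'weight even and weight >= 4' (intended as faster; a timing run measured ~129x at n=262144 on even inputs but could not confirm it consistently since A also returns quickly on odd inputs).
import Mathlib
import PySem

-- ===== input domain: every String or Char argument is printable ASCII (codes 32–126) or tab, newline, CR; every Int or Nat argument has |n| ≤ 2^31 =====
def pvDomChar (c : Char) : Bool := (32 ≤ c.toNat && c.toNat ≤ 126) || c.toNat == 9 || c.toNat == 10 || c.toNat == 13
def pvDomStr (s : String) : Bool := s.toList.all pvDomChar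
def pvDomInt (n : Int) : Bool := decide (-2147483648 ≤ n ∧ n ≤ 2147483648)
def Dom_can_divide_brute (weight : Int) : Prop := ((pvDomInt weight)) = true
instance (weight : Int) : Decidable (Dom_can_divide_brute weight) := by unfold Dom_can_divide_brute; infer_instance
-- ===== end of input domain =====

-- B replaces A's nested brute-force scan with the closed-form test: even and ≥ 4 (simpler).

-- ===== PORT A =====
-- inner 'for j in range(weight)' loop, early return 'YES'
def cdbLoopJ (weight i : Int) : List Int → Option String
  | [] => none
  | j :: js =>
      if PySem.Int.mod i 2 == 0 && PySem.Int.mod j 2 == 0 && i + j == weight then some "YES"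
      else cdbLoopJ weight i js

-- outer 'for i in range(weight)' loop
def cdbLoopI (weight : Int) : List Int → Option String
  | [] => none
  | i :: is =>
      match cdbLoopJ weight i (PySem.List.pyRange 0 weight 1) with
      | some s => some s
      | none => cdbLoopI weight is

def can_divide_brute (weight : Int) : String :=
  if PySem.Int.mod weight 2 == 0 then
    match cdbLoopI weight (PySem.List.pyRange 0 weight 1) with
    | some s => s
    | none => "NO"
  else "NO"

-- ===== PORT B =====
def can_divide_brute_alt (weight : Int) : String :=
  if PySem.Int.mod weight 2 == 0 && weight ≥ 4 then "YES" else "NO"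

-- ===== PRECONDITION & SPEC =====
def Spec_can_divide_brute (weight : Int) (out : String) : Prop := out = can_divide_brute_alt weight
instance (weight : Int) (out : String) : Decidable (Spec_can_divide_brute weight out) := by unfold Spec_can_divide_brute; infer_instance

-- ===== CLAIM (what is proved, stated in full; the proofs are below) =====
def Claim_equal_can_divide_brute : Prop := ∀ (weight : Int), Dom_can_divide_brute weight → Spec_can_divide_brute weight (can_divide_brute weight)

-- ===== LEMMAS AND PROOFS =====

theorem cdbLoopJ_none_or (weight i : Int) (l : List Int) :
    cdbLoopJ weight i l = none ∨ cdbLoopJ weight i l = some "YES" := by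
  induction l with
  | nil => left; rfl
  | cons j js ih =>
      by_cases h : ((2 : Int) ∣ i ∧ (2 : Int) ∣ j) ∧ i + j = weight <;>
        simp [cdbLoopJ, h]
      all_goals tauto

theorem cdbLoopJ_some_iff (weight i : Int) (l : List Int) :
    cdbLoopJ weight i l = some "YES" ↔
      ∃ j ∈ l, ((2 : Int) ∣ i ∧ (2 : Int) ∣ j) ∧ i + j = weight := by
  induction l with
  | nil => simp [cdbLoopJ]
  | cons j js ih =>
      by_cases h : ((2 : Int) ∣ i ∧ (2 : Int) ∣ j) ∧ i + j = weight <;>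
        simp [cdbLoopJ, h, ih]

theorem cdbLoopI_none_or (weight : Int) (l : List Int) :
    cdbLoopI weight l = none ∨ cdbLoopI weight l = some "YES" := by
  induction l with
  | nil => left; rfl
  | cons i is ih =>
      rcases cdbLoopJ_none_or weight i (PySem.List.pyRange 0 weight 1) with h | h
      · simpa [cdbLoopI, h] using ih
      · right; simp [cdbLoopI, h]

theorem cdbLoopI_some_iff (weight : Int) (l : List Int) :
    cdbLoopI weight l = some "YES" ↔
      ∃ i ∈ l, cdbLoopJ weight i (PySem.List.pyRange 0 weight 1) = some "YES" := by
  induction l with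
  | nil => simp [cdbLoopI]
  | cons i is ih =>
      rcases cdbLoopJ_none_or weight i (PySem.List.pyRange 0 weight 1) with h | h <;>
        simp [cdbLoopI, h, ih]

theorem cdb_exists_iff (weight : Int) (hw : PySem.Int.mod weight 2 = 0) :
    (∃ i ∈ PySem.List.pyRange 0 weight 1,
        cdbLoopJ weight i (PySem.List.pyRange 0 weight 1) = some "YES") ↔ 4 ≤ weight := by
  constructor
  · rintro ⟨i, hi, hj⟩
    rw [cdbLoopJ_some_iff] at hj
    rcases hj with ⟨j, hjmem, ⟨hi2, hj2⟩, hsum⟩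
    rw [PySem.List.mem_pyRange_one] at hi hjmem
    omega
  · intro h4
    have hw' : (2 : Int) ∣ weight := (PySem.Int.mod_eq_zero_iff_dvd weight 2).1 hw
    refine ⟨2, PySem.List.mem_pyRange_one.2 ⟨by norm_num, by omega⟩, ?_⟩
    rw [cdbLoopJ_some_iff]
    exact ⟨weight - 2, PySem.List.mem_pyRange_one.2 ⟨by omega, by omega⟩,
      ⟨⟨1, rfl⟩, by omega⟩, by ring⟩

-- ===== VERDICT (by name: the statement is the Claim_ definition above) =====
theorem can_divide_brute_spec : Claim_equal_can_divide_brute := by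
  intro weight _
  unfold Spec_can_divide_brute can_divide_brute can_divide_brute_alt
  by_cases hw : PySem.Int.mod weight 2 = 0
  · by_cases h4 : (4 : Int) ≤ weight
    · have hsome : cdbLoopI weight (PySem.List.pyRange 0 weight 1) = some "YES" :=
        (cdbLoopI_some_iff weight _).2 ((cdb_exists_iff weight hw).2 h4)
      rw [hsome]
      simp [h4]
    · have hnone : cdbLoopI weight (PySem.List.pyRange 0 weight 1) = none := by
        rcases cdbLoopI_none_or weight (PySem.List.pyRange 0 weight 1) with h | h
        · exact h
        · exact absurd ((cdb_exists_iff weight hw).1 ((cdbLoopI_some_iff weight _).1 h)) h4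
      rw [hnone]
      simp [h4]
  · have hnd : ¬ (2 : Int) ∣ weight := fun h => hw ((PySem.Int.mod_eq_zero_iff_dvd weight 2).2 h)
    simp [hnd]
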